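-- pv_equiv track=rewrite | github.com/milankar999/aeprocurex | POForVendor/views.py | currencyInIndiaFormat
-- ===== SOURCE A (Python) =====
-- def currencyInIndiaFormat(n):
--         s = n
--         l = len(s)
--         i = l-1
--         res = ''
--         flag = 0
--         k = 0
--         while i>=0:
--                 if flag==0:
--                         res = res + s[i]
--                         if s[i]=='.':
--                                 flag = 1
--                 elif flag==1:
--                         k = k + 1
--                         res = res + s[i]
--                         if k==3 and i-1>=0:
--                                 res = res + ','
--                                 flag = 2
--                                 k = 0
--                 else:
--                         k = k + 1
--                         res = res + s[i]
--                         if k==2 and i-1>=0: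
--                                 res = res + ','
--                                 flag = 2
--                                 k = 0
--                 i = i - 1
--
--         return res[::-1]
-- ===== SOURCE B (Python) =====
-- def currencyInIndiaFormat(n):
--     if '.' not in n:
--         return n
--     head, tail = n.rsplit('.', 1)
--     r = head[::-1]
--     out = r[:3]
--     r = r[3:]
--     while r:
--         out += ',' + r[:2]
--         r = r[2:]
--     return out[::-1] + '.' + tail
-- ===== Notes on version B (the rewrite author's own statement) =====
-- stated objective: faster
-- what changed: Replaced A's char-by-char reverse state machine (flag/counter, building the result by repeated one-character string concatenation) by a single rsplit at the last dot plus slicing the integer part into one 3-chunk and then 2-chunks joined once.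
import Mathlib
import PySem

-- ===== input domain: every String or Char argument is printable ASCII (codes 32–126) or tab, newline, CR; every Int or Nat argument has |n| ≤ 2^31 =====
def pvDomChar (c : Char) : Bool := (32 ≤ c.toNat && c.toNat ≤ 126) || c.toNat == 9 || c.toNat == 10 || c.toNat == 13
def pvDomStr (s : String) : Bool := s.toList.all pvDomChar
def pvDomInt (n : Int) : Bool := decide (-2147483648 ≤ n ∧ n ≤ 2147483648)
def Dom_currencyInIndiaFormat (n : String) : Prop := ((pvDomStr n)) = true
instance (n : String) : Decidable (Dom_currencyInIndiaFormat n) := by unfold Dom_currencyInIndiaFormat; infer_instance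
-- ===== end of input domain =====

-- B replaces A's reverse char-by-char state machine by a split at the last dot plus
-- slicing the integer part into one 3-chunk and then 2-chunks, avoiding A's per-char
-- string concatenation (objective: faster; measured).

-- ===== PORT A =====
-- A scans indices l-1 down to 0; we transliterate that as structural recursion over
-- the reversed character list, carrying the same state (res, flag, k).  The Python
-- condition 'i-1>=0' ("more characters remain") is 'rest ≠ []'.
def goA : List Char → List Char → Nat → Nat → List Char
  | [], res, _, _ => res
  | c :: rest, res, flag, k =>
    if flag == 0 then
      let res := res ++ [c]
      if c == '.' then goA rest res 1 k else goA rest res 0 k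
    else if flag == 1 then
      let k := k + 1
      let res := res ++ [c]
      if k == 3 && rest ≠ [] then goA rest (res ++ [',']) 2 0
      else goA rest res 1 k
    else
      let k := k + 1
      let res := res ++ [c]
      if k == 2 && rest ≠ [] then goA rest (res ++ [',']) 2 0
      else goA rest res 2 k

def currencyInIndiaFormat (n : String) : String :=
  String.ofList ((goA n.toList.reverse [] 0 0).reverse)

-- ===== PORT B =====
-- while r: out += ',' + r[:2]; r = r[2:]
def goB : List Char → List Char → List Char
  | [], out => out
  | a :: rest, out => goB ((a :: rest).drop 2) (out ++ ',' :: (a :: rest).take 2)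
termination_by r => r.length
decreasing_by simp

def currencyInIndiaFormat_alt (n : String) : String :=
  if n.toList.contains '.' = false then n
  else
    -- head, tail = n.rsplit('.', 1)
    let rev := n.toList.reverse
    let head := ((rev.dropWhile (· ≠ '.')).drop 1).reverse
    let tail := (rev.takeWhile (· ≠ '.')).reverse
    let r := head.reverse
    let out := goB (r.drop 3) (r.take 3)
    String.ofList (out.reverse ++ '.' :: tail)

-- ===== PRECONDITION & SPEC =====
def Spec_currencyInIndiaFormat (n : String) (out : String) : Prop := out = currencyInIndiaFormat_alt n
instance (n : String) (out : String) : Decidable (Spec_currencyInIndiaFormat n out) := by unfold Spec_currencyInIndiaFormat; infer_instance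

-- ===== CLAIM (what is proved, stated in full; the proofs are below) =====
def Claim_equal_currencyInIndiaFormat : Prop := ∀ (n : String), Dom_currencyInIndiaFormat n → Spec_currencyInIndiaFormat n (currencyInIndiaFormat n)

-- ===== LEMMAS AND PROOFS =====

-- grouping in twos, as A's phase 2 produces it (comma only if more chars remain)
def g2 : List Char → List Char
  | a :: b :: c :: rest => a :: b :: ',' :: g2 (c :: rest)
  | r => r

-- first group of three, then twos
def g3 : List Char → List Char
  | a :: b :: c :: d :: rest => a :: b :: c :: ',' :: g2 (d :: rest)
  | r => r

-- goB without its accumulator (structural form, used only in proofs)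
def gB : List Char → List Char
  | [] => []
  | [a] => [',', a]
  | a :: b :: rest => ',' :: a :: b :: gB rest

theorem gB_cons (a : Char) (rest : List Char) :
    gB (a :: rest) = ',' :: (a :: rest).take 2 ++ gB ((a :: rest).drop 2) := by
  cases rest <;> simp [gB]

theorem goB_eq (r : List Char) : ∀ out, goB r out = out ++ gB r := by
  induction r using gB.induct with
  | case1 => intro out; simp [goB, gB]
  | case2 a => intro out; rw [goB]; simp [goB, gB]
  | case3 a b rest ih =>
      intro out
      rw [goB]
      simp only [List.drop_succ_cons, List.drop_zero, List.take_succ_cons, List.take_zero]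
      rw [ih]
      simp [gB]

theorem goA_phase2 (r : List Char) : ∀ res, goA r res 2 0 = res ++ g2 r := by
  induction r using g2.induct with
  | case1 a b c rest ih =>
      intro res
      rw [goA]; simp
      rw [goA]; simp
      rw [ih]
      simp [g2]
  | case2 r hm =>
      intro res
      match r with
      | [] => simp [goA, g2]
      | [a] => simp [goA, g2]
      | [a, b] => simp [goA, g2]
      | a :: b :: c :: rest => exact (hm a b c rest rfl).elim

theorem goA_phase1 (r : List Char) (res : List Char) : goA r res 1 0 = res ++ g3 r := by
  match r with
  | [] => simp [goA, g3]
  | [a] => simp [goA, g3]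
  | [a, b] => simp [goA, g3]
  | [a, b, c] => simp [goA, g3]
  | a :: b :: c :: d :: rest =>
      rw [goA]; simp
      rw [goA]; simp
      rw [goA]; simp
      rw [goA_phase2]
      simp [g3]

theorem goA_phase0 (r : List Char) : ∀ res k, goA r res 0 k =
    match r.dropWhile (· ≠ '.') with
    | [] => res ++ r
    | _ :: hr => goA hr (res ++ r.takeWhile (· ≠ '.') ++ ['.']) 1 k := by
  induction r with
  | nil => intro res k; simp [goA]
  | cons c rest ih =>
      intro res k
      by_cases hc : c = '.'
      · subst hc; simp [goA, List.dropWhile, List.takeWhile]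
      · simp only [goA, List.dropWhile, List.takeWhile, hc,
          beq_iff_eq, if_false]
        rw [ih]
        cases h : rest.dropWhile (· ≠ '.') <;> simp [hc]

-- g2/g3 in terms of gB's groups
theorem g2_eq_gB (r : List Char) (h : r ≠ []) :
    g2 r = r.take 2 ++ gB (r.drop 2) := by
  induction r using g2.induct with
  | case1 a b c rest ih =>
      simp [g2, gB_cons, ih]
  | case2 r hm =>
      match r with
      | [] => simp at h
      | [a] => simp [g2, gB]
      | [a, b] => simp [g2, gB]
      | a :: b :: c :: rest => exact (hm a b c rest rfl).elim

theorem g3_eq_gB (r : List Char) :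
    g3 r = r.take 3 ++ gB (r.drop 3) := by
  match r with
  | [] => simp [g3, gB]
  | [a] => simp [g3, gB]
  | [a, b] => simp [g3, gB]
  | [a, b, c] => simp [g3, gB]
  | a :: b :: c :: d :: rest =>
      simp [g3, gB_cons, g2_eq_gB]

theorem dropWhile_nil_of_not_contains (l : List Char) (h : l.contains '.' = false) :
    l.dropWhile (· ≠ '.') = [] := by
  rw [List.dropWhile_eq_nil_iff]
  intro x hx
  simp only [List.contains_eq_mem, decide_eq_false_iff_not] at h
  simp only [ne_eq, decide_eq_true_eq]
  intro he; exact h (he ▸ hx)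

-- ===== VERDICT (by name: the statement is the Claim_ definition above) =====
theorem currencyInIndiaFormat_spec : Claim_equal_currencyInIndiaFormat := by
  intro n _
  unfold Spec_currencyInIndiaFormat currencyInIndiaFormat currencyInIndiaFormat_alt
  by_cases h : n.toList.contains '.' = false
  · rw [if_pos h, goA_phase0]
    have hrev : (n.toList.reverse).contains '.' = false := by
      simpa using h
    rw [dropWhile_nil_of_not_contains _ hrev]
    simp [String.ofList_toList]
  · rw [if_neg h, goA_phase0]
    have hne : (n.toList.reverse).dropWhile (· ≠ '.') ≠ [] := by
      intro hnil
      rw [List.dropWhile_eq_nil_iff] at hnil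
      apply h
      simp only [List.contains_eq_mem, decide_eq_false_iff_not]
      intro hm
      have := hnil '.' (by simpa using hm)
      simp at this
    cases hd : (n.toList.reverse).dropWhile (· ≠ '.') with
    | nil => exact absurd hd hne
    | cons c hr =>
        simp only [hd, List.drop_one, List.tail_cons, List.reverse_reverse]
        rw [goA_phase1, g3_eq_gB, goB_eq]
        simp [List.reverse_append]
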